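-- pv_equiv track=rewrite | github.com/SSAFY-while-true/ppower-dev | 202503_3/PGS389479.py | solution
-- ===== SOURCE A (Python) =====
-- def solution(players, m, k):
--     answer = 0
--     servers = []
--     for player in players:
--         now_server = sum(x[0] for x in servers)
--         if player >= (now_server + 1) * m:
--             needed_server = player // m - now_server
--             servers.append((needed_server, k))
--             answer += needed_server
--
--         new_servers = []
--         for server in servers:
--             new_server = (server[0], server[1] - 1)
--             if new_server[1] > 0:
--                 new_servers.append(new_server)
--
--         servers = new_servers
--
--     return answer
-- ===== SOURCE B (Python) =====
-- def solution(players, m, k):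
--     # O(n) single pass: running count of active servers plus a difference map
--     # keyed by the hour at which servers added now stop counting (i + k).
--     answer = 0
--     active = 0
--     expire = {}
--     for i, player in enumerate(players):
--         active -= expire.get(i, 0)
--         if player >= (active + 1) * m:
--             need = player // m - active
--             answer += need
--             if k > 1:  # a server added now is only ever counted during hours i+1 .. i+k-1
--                 active += need
--                 expire[i + k] = expire.get(i + k, 0) + need
--     return answer
-- ===== Notes on version B (the rewrite author's own statement) =====
-- stated objective: faster
-- what changed: Replaces the per-hour rebuild and re-summation of the whole server list (decrement/filter plus sum(x[0]) every iteration) with a single running active-server counter and an expiry difference map keyed by i+k, giving one O(1) step per hour.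
import Mathlib
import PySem

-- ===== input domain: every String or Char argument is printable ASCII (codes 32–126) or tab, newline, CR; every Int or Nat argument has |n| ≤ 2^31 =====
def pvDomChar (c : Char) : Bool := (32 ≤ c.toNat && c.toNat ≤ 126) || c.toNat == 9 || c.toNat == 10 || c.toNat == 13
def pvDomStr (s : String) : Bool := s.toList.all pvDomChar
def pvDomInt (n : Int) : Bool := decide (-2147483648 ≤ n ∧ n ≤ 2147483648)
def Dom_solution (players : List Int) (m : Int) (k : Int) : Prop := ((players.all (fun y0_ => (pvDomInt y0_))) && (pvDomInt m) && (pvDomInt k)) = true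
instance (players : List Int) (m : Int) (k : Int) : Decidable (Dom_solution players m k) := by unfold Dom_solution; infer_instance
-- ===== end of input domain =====

-- B replaces A's per-hour rebuild/re-summation of the server list with a running
-- active counter and an expiry difference map keyed by i+k (one O(1) step per hour).

-- ===== PORT A =====
-- sum(x[0] for x in servers)
def sumC (s : List (Int × Int)) : Int := (s.map (·.1)).sum

-- one iteration of A's loop body (state = (answer, servers))
def stepA (m k : Int) (st : Int × List (Int × Int)) (player : Int) : Int × List (Int × Int) :=
  let now_server : Int := sumC st.2
  let st' :=
    if (now_server + 1) * m ≤ player then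
      let needed_server := PySem.Int.floordiv player m - now_server
      (st.1 + needed_server, st.2 ++ [(needed_server, k)])
    else st
  (st'.1, (st'.2.map (fun s => (s.1, s.2 - 1))).filter (fun s => 0 < s.2))

def solution (players : List Int) (m : Int) (k : Int) : Int :=
  (players.foldl (stepA m k) (0, [])).1

-- ===== PORT B =====
-- one iteration of B's loop body (state = (answer, active, expire); ip = (i, player))
def stepB (m k : Int) (st : Int × Int × PySem.Dict Int Int) (ip : Int × Int) : Int × Int × PySem.Dict Int Int :=
  let active := st.2.1 - st.2.2.getD ip.1 0
  if (active + 1) * m ≤ ip.2 then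
    let need := PySem.Int.floordiv ip.2 m - active
    if 1 < k then
      (st.1 + need, active + need, st.2.2.insert (ip.1 + k) (st.2.2.getD (ip.1 + k) 0 + need))
    else
      (st.1 + need, active, st.2.2)
  else (st.1, active, st.2.2)

def solution_alt (players : List Int) (m : Int) (k : Int) : Int :=
  ((PySem.List.enumerate players 0).foldl (stepB m k) (0, 0, PySem.Dict.empty)).1

-- ===== PRECONDITION & SPEC =====
-- Pre_ excludes exactly the inputs on which A raises ZeroDivisionError:
-- m = 0 together with some player ≥ 0 (the provisioning branch then divides by m).
def Pre_solution (players : List Int) (m : Int) (k : Int) : Prop :=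
  m ≠ 0 ∨ (∀ p ∈ players, p < 0)
instance (players : List Int) (m : Int) (k : Int) : Decidable (Pre_solution players m k) := by
  unfold Pre_solution; infer_instance

def pvWitness_solution : List Int × Int × Int := ([3, 10, 0, 7], 2, 3)

def Spec_solution (players : List Int) (m : Int) (k : Int) (out : Int) : Prop := out = solution_alt players m k
instance (players : List Int) (m : Int) (k : Int) (out : Int) : Decidable (Spec_solution players m k out) := by unfold Spec_solution; infer_instance

-- ===== CLAIM (what is proved, stated in full; the proofs are below) =====
def Claim_equal_solution : Prop := ∀ (players : List Int) (m : Int) (k : Int), Dom_solution players m k → Pre_solution players m k → Spec_solution players m k (solution players m k)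

-- ===== LEMMAS AND PROOFS =====

-- counts of the servers of `s` (seen at hour i) that stop counting at hour t
def expSum (i : Int) (s : List (Int × Int)) (t : Int) : Int :=
  ((s.filter (fun p => i + p.2 = t)).map (·.1)).sum

theorem sumC_nil : sumC [] = 0 := rfl
theorem sumC_cons (p : Int × Int) (s : List (Int × Int)) : sumC (p :: s) = p.1 + sumC s := rfl

theorem expSum_nil (i t : Int) : expSum i [] t = 0 := rfl

theorem expSum_cons (i t : Int) (p : Int × Int) (s : List (Int × Int)) :
    expSum i (p :: s) t = (if i + p.2 = t then p.1 else 0) + expSum i s t := by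
  simp only [expSum, List.filter_cons]
  by_cases h : i + p.2 = t <;> simp [h]

theorem expSum_append (i t : Int) (s₁ s₂ : List (Int × Int)) :
    expSum i (s₁ ++ s₂) t = expSum i s₁ t + expSum i s₂ t := by
  simp [expSum, List.filter_append]

-- after decrement-and-filter, the active total drops by exactly the counts expiring at hour i+1
theorem sumC_dec_filter (i : Int) (s : List (Int × Int)) (h : ∀ p ∈ s, 1 ≤ p.2) :
    sumC ((s.map (fun p => (p.1, p.2 - 1))).filter (fun p => 0 < p.2)) =
      sumC s - expSum i s (i + 1) := by
  induction s with
  | nil => simp [sumC_nil, expSum_nil]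
  | cons p s ih =>
    have hp : 1 ≤ p.2 := h p List.mem_cons_self
    have hs : ∀ q ∈ s, 1 ≤ q.2 := fun q hq => h q (List.mem_cons_of_mem _ hq)
    simp only [List.map_cons, List.filter_cons]
    rw [sumC_cons, expSum_cons]
    by_cases h1 : p.2 = 1
    · rw [if_neg (by simp; omega), if_pos (by omega), ih hs]
      ring
    · rw [if_pos (by simp; omega), if_neg (by omega), sumC_cons, ih hs]
      ring

-- after decrement-and-filter, expiry totals at hours beyond i+1 are unchanged
theorem expSum_dec_filter (i t : Int) (s : List (Int × Int)) (ht : i + 1 < t) :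
    expSum (i + 1) ((s.map (fun p => (p.1, p.2 - 1))).filter (fun p => 0 < p.2)) t =
      expSum i s t := by
  induction s with
  | nil => simp [expSum_nil]
  | cons p s ih =>
    simp only [List.map_cons, List.filter_cons]
    rw [expSum_cons i t p s]
    by_cases h1 : (0 : Int) < p.2 - 1
    · rw [if_pos (by simpa using h1)]
      rw [expSum_cons, ih]
      have : (i + 1 + (p.2 - 1) = t) ↔ (i + p.2 = t) := by omega
      simp only [this]
    · rw [if_neg (by simpa using h1)]
      rw [if_neg (by omega), ih]
      ring

-- every surviving server has life ≥ 1
theorem life_dec_filter (s : List (Int × Int)) :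
    ∀ p ∈ (s.map (fun p => (p.1, p.2 - 1))).filter (fun p => 0 < p.2), 1 ≤ p.2 := by
  intro p hp
  have h2 := List.of_mem_filter hp
  simp at h2
  omega

-- decrement-and-filter of a single just-provisioned batch
theorem sing_pos (c k : Int) (hk : 1 < k) :
    (([(c, k)].map (fun s => (s.1, s.2 - 1))).filter (fun s => 0 < s.2)) = [(c, k - 1)] := by
  simp [List.filter_cons]
  omega

theorem sing_neg (c k : Int) (hk : ¬ 1 < k) :
    (([(c, k)].map (fun s => (s.1, s.2 - 1))).filter (fun s => 0 < s.2)) = [] := by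
  simp [List.filter_cons]
  omega

theorem sumC_append (s₁ s₂ : List (Int × Int)) : sumC (s₁ ++ s₂) = sumC s₁ + sumC s₂ := by
  simp [sumC]

-- main simulation: from a pair of related states, both loops produce the same answer
theorem sim (m k : Int) (players : List Int) :
    ∀ (i ansA ansB active : Int) (servers : List (Int × Int)) (expire : PySem.Dict Int Int),
    ansA = ansB →
    active - expire.getD i 0 = sumC servers →
    (∀ p ∈ servers, 1 ≤ p.2) →
    (∀ t, i < t → expire.getD t 0 = expSum i servers t) →
    (players.foldl (stepA m k) (ansA, servers)).1 =
      ((PySem.List.enumerate players i).foldl (stepB m k) (ansB, active, expire)).1 := by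
  induction players with
  | nil =>
    intro i ansA ansB active servers expire h1 _ _ _
    simpa [PySem.List.enumerate_nil] using h1
  | cons player ps ih =>
    intro i ansA ansB active servers expire h1 h2 h3 h4
    rw [PySem.List.enumerate_cons, List.foldl_cons, List.foldl_cons]
    simp only [stepA, stepB, h2]
    by_cases hc : (sumC servers + 1) * m ≤ player
    · rw [if_pos hc, if_pos hc]
      by_cases hk : 1 < k
      · -- provisioning, servers live beyond this hour
        rw [if_pos hk]
        refine ih (i + 1) _ _ _ _ _ (by rw [h1]) ?_ (life_dec_filter _) ?_
        · -- active-count invariant at i + 1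
          simp only [List.map_append, List.filter_append]
          rw [sumC_append, sumC_dec_filter i servers h3, sing_pos _ _ hk,
              sumC_cons, sumC_nil, PySem.Dict.getD_insert, if_neg (by omega : ¬ (i + 1 = i + k)),
              h4 (i + 1) (by omega)]
          ring
        · -- expiry-map invariant at i + 1
          intro t ht
          simp only [List.map_append, List.filter_append]
          rw [expSum_append, expSum_dec_filter i t servers ht, sing_pos _ _ hk,
              expSum_cons, expSum_nil, PySem.Dict.getD_insert]
          by_cases he : t = i + k
          · subst he
            rw [if_pos rfl, if_pos (by omega), h4 (i + k) (by omega)]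
            ring
          · rw [if_neg he, if_neg (by omega), h4 t (by omega)]
            ring
      · -- provisioning, but the new servers expire before the next hour (k ≤ 1)
        rw [if_neg hk]
        refine ih (i + 1) _ _ _ _ _ (by rw [h1]) ?_ (life_dec_filter _) ?_
        · simp only [List.map_append, List.filter_append]
          rw [sumC_append, sumC_dec_filter i servers h3, sing_neg _ _ hk, sumC_nil,
              h4 (i + 1) (by omega)]
          ring
        · intro t ht
          simp only [List.map_append, List.filter_append]
          rw [expSum_append, expSum_dec_filter i t servers ht, sing_neg _ _ hk, expSum_nil,
              h4 t (by omega)]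
          ring
    · -- no provisioning this hour
      rw [if_neg hc, if_neg hc]
      refine ih (i + 1) _ _ _ _ _ h1 ?_ (life_dec_filter _) ?_
      · rw [h4 (i + 1) (by omega), sumC_dec_filter i servers h3]
      · intro t ht
        rw [expSum_dec_filter i t servers ht, h4 t (by omega)]

theorem solution_spec : Claim_equal_solution := by
  intro players m k _ _
  unfold Spec_solution solution solution_alt
  exact sim m k players 0 0 0 0 [] PySem.Dict.empty rfl (by simp [sumC_nil, PySem.Dict.getD_empty])
    (by simp) (by intro t _; simp [PySem.Dict.getD_empty, expSum_nil])
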